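-- pv_equiv track=rewrite | github.com/kim-jang-hyun/table_rag | basic_rag.py | _fill_rowspan_cells
-- ===== SOURCE A (Python) =====
-- from typing import Dict, Iterable, List, Sequence, Tuple, Union
--
-- def _fill_rowspan_cells(body: List[List[str]]) -> List[List[str]]:
--     """
--     PyMuPDF는 rowspan 병합 셀 값을 스팬의 마지막 행에 배치하고
--     앞 행들은 빈 문자열로 둡니다. 빈 셀 구간을 뒤에 오는 값으로 소급 채웁니다.
--
--     예) ["", "A-1", ...] / ["A계열", "A-2", ...] → ["A계열", "A-1", ...] / ["A계열", "A-2", ...]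
--     """
--     if not body:
--         return body
--     n_cols = max(len(r) for r in body)
--     result = [list(r) + [""] * (n_cols - len(r)) for r in body]
--     n_rows = len(result)
--
--     for col in range(n_cols):
--         i = 0
--         while i < n_rows:
--             if not result[i][col]:
--                 # 빈 구간 시작 — 다음 비어있지 않은 셀을 찾아 소급 채움
--                 j = i + 1
--                 while j < n_rows and not result[j][col]:
--                     j += 1
--                 if j < n_rows:
--                     # [i, j-1] 범위를 result[j][col] 값으로 채움
--                     for k in range(i, j):
--                         result[k][col] = result[j][col]
--                 i = j + 1
--             else:
--                 i += 1
--     return result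
-- ===== SOURCE B (Python) =====
-- def _fill_rowspan_cells(body):
--     if not body:
--         return body
--     n_cols = max(len(r) for r in body)
--     result = [list(r) + [""] * (n_cols - len(r)) for r in body]
--     for col in range(n_cols):
--         carry = ""
--         for row in range(len(result) - 1, -1, -1):
--             if result[row][col]:
--                 carry = result[row][col]
--             else:
--                 result[row][col] = carry
--     return result
-- ===== Notes on version B (the rewrite author's own statement) =====
-- stated objective: simpler
-- what changed: Replaces A's nested forward scan per column (find each empty run, look ahead for the next non-empty cell, then back-fill the run) by a single bottom-up pass per column that carries the last non-empty value seen.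
import Mathlib
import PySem

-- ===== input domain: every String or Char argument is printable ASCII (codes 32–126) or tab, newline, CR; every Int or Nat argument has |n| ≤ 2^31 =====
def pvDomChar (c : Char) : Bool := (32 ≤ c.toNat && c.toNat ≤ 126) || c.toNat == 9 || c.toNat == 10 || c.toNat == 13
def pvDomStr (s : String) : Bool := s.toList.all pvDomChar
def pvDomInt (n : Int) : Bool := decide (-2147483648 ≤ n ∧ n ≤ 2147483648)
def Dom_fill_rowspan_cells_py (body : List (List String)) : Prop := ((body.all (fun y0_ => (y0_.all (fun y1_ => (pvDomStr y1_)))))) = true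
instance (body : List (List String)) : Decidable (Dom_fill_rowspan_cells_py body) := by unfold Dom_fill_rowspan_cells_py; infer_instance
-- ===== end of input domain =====

-- B is a simpler decomposition of the same task: one bottom-up pass per column with a carried
-- value, instead of A's forward scan for each empty run. Return value only; neither mutates its input.

-- shared cell accessors: `result[r][col]` read / write on the padded grid (in-range during both
-- algorithms, so the total getD/set forms compute exactly what Python computes)
def cellGet (res : List (List String)) (r c : Nat) : String :=
  (((res[r]?).getD [])[c]?).getD ""

def cellSet (res : List (List String)) (r c : Nat) (v : String) : List (List String) :=
  res.set r (((res[r]?).getD []).set c v)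

-- ===== PORT A =====
-- `while j < n_rows and not result[j][col]: j += 1` — returns the final j
def scanJ (res : List (List String)) (col nrows j : Nat) : Nat :=
  if h : j < nrows ∧ cellGet res j col = "" then scanJ res col nrows (j + 1) else j
termination_by nrows - j
decreasing_by omega

-- needed by loopA's termination proof
theorem scanJ_ge (res : List (List String)) (col nrows : Nat) :
    ∀ j, j ≤ scanJ res col nrows j := by
  intro j
  induction j using (scanJ.induct res col nrows) with
  | case1 j h ih => rw [scanJ, dif_pos h]; omega
  | case2 j h => rw [scanJ, dif_neg h]

-- `for k in range(i, j): result[k][col] = v`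
def fillRange (res : List (List String)) (col : Nat) (v : String) (i j : Nat) :
    List (List String) :=
  if i < j then fillRange (cellSet res i col v) col v (i + 1) j else res
termination_by j - i
decreasing_by omega

-- the `while i < n_rows:` loop of A for one column
def loopA (res : List (List String)) (col nrows i : Nat) : List (List String) :=
  if h : i < nrows then
    if cellGet res i col = "" then
      let j := scanJ res col nrows (i + 1)
      let res' := if j < nrows then fillRange res col (cellGet res j col) i j else res
      loopA res' col nrows (j + 1)
    else
      loopA res col nrows (i + 1)
  else res
termination_by nrows - i
decreasing_by
  · have := scanJ_ge res col nrows (i + 1); omega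
  · omega

def fill_rowspan_cells_py (body : List (List String)) : List (List String) :=
  if body = [] then body
  else
    let ncols := (body.map List.length).foldl Nat.max 0
    let result := body.map (fun r => r ++ List.replicate (ncols - r.length) "")
    let nrows := result.length
    (List.range ncols).foldl (fun res col => loopA res col nrows 0) result

-- ===== PORT B =====
-- `for row in range(len(result)-1, -1, -1): …` with the carried value; `r` rows remain (r-1 first)
def passB (res : List (List String)) (col : Nat) : Nat → String → List (List String)
  | 0, _ => res
  | r + 1, carry =>
    let cell := cellGet res r col
    if cell ≠ "" then passB res col r cell
    else passB (cellSet res r col carry) col r carry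

def fill_rowspan_cells_py_alt (body : List (List String)) : List (List String) :=
  if body = [] then body
  else
    let ncols := (body.map List.length).foldl Nat.max 0
    let result := body.map (fun r => r ++ List.replicate (ncols - r.length) "")
    (List.range ncols).foldl (fun res col => passB res col res.length "") result

-- ===== PRECONDITION & SPEC =====
def Spec_fill_rowspan_cells_py (body : List (List String)) (out : List (List String)) : Prop := out = fill_rowspan_cells_py_alt body
instance (body : List (List String)) (out : List (List String)) : Decidable (Spec_fill_rowspan_cells_py body out) := by unfold Spec_fill_rowspan_cells_py; infer_instance

-- ===== CLAIM (what is proved, stated in full; the proofs are below) =====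
def Claim_equal_fill_rowspan_cells_py : Prop := ∀ (body : List (List String)), Dom_fill_rowspan_cells_py body → Spec_fill_rowspan_cells_py body (fill_rowspan_cells_py body)

-- ===== LEMMAS AND PROOFS =====

-- the common per-cell value: first non-empty cell of the column at index ≥ k (below the bound), else the carry
def specCell (res : List (List String)) (col bound : Nat) (carry : String) (k : Nat) : String :=
  if scanJ res col bound k < bound then cellGet res (scanJ res col bound k) col else carry

theorem cellSet_length (res : List (List String)) (r c : Nat) (v : String) :
    (cellSet res r c v).length = res.length := by
  simp [cellSet]

theorem cellSet_getElem? (res : List (List String)) (r c : Nat) (v : String) (k : Nat) :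
    (cellSet res r c v)[k]? = if r = k then (res[k]?).map (fun row => row.set c v) else res[k]? := by
  unfold cellSet
  rcases eq_or_ne r k with rfl | hne
  · simp only [List.getElem?_set_self']
    rcases res[r]? with _ | row <;> simp
  · simp [List.getElem?_set_ne hne, hne]

theorem cellGet_of_ne (res : List (List String)) (r c : Nat) (v : String) (k kc : Nat)
    (h : r ≠ k) : cellGet (cellSet res r c v) k kc = cellGet res k kc := by
  simp [cellGet, cellSet_getElem?, h]

-- row.set c (row[c] or "") = row : setting a cell to the value cellGet read is a no-op
theorem set_cellGet_self (row : List String) (c : Nat) :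
    row.set c ((row[c]?).getD "") = row := by
  rcases h : row[c]? with _ | x
  · exact List.set_eq_of_length_le (by simpa using List.getElem?_eq_none_iff.mp h)
  · have hc : c < row.length := (List.getElem?_eq_some_iff.mp h).1
    have hx : row[c] = x := by simpa [List.getElem?_eq_getElem hc] using h
    simp [hx.symm, List.set_getElem_self]

theorem map_set_cellGet (res : List (List String)) (k c : Nat)
    : (res[k]?).map (fun row => row.set c (cellGet res k c)) = res[k]? := by
  rcases h : res[k]? with _ | row
  · rfl
  · simp only [Option.map_some]
    congr 1
    have : cellGet res k c = (row[c]?).getD "" := by simp [cellGet, h]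
    rw [this, set_cellGet_self]

theorem scanJ_unfold (res : List (List String)) (col nrows j : Nat) :
    scanJ res col nrows j =
      if j < nrows ∧ cellGet res j col = "" then scanJ res col nrows (j + 1) else j := by
  rw [scanJ]; rw [dite_eq_ite]

-- scanJ only reads cells at indices m with j ≤ m < nrows
theorem scanJ_congr (res res' : List (List String)) (col nrows : Nat) : ∀ j,
    (∀ m, j ≤ m → m < nrows → cellGet res' m col = cellGet res m col) →
    scanJ res' col nrows j = scanJ res col nrows j := by
  intro j
  induction j using (scanJ.induct res col nrows) with
  | case1 j h ih =>
    intro hagree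
    rw [scanJ_unfold res', scanJ_unfold res, if_pos h,
      if_pos (show j < nrows ∧ cellGet res' j col = "" from ⟨h.1, by rw [hagree j le_rfl h.1]; exact h.2⟩)]
    exact ih (fun m hm => hagree m (by omega))
  | case2 j h =>
    intro hagree
    rw [scanJ_unfold res', scanJ_unfold res, if_neg h, if_neg (by
      rintro ⟨h1, h2⟩; exact h ⟨h1, by rw [← hagree j le_rfl h1]; exact h2⟩)]

theorem scanJ_le (res : List (List String)) (col nrows : Nat) :
    ∀ j, j ≤ nrows → scanJ res col nrows j ≤ nrows := by
  intro j
  induction j using (scanJ.induct res col nrows) with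
  | case1 j h ih => intro _; rw [scanJ_unfold, if_pos h]; exact ih (by omega)
  | case2 j h => intro hj; rw [scanJ_unfold, if_neg h]; exact hj

theorem scanJ_stop (res : List (List String)) (col nrows : Nat) :
    ∀ j, ¬ (scanJ res col nrows j < nrows ∧ cellGet res (scanJ res col nrows j) col = "") := by
  intro j
  induction j using (scanJ.induct res col nrows) with
  | case1 j h ih => rw [scanJ_unfold, if_pos h]; exact ih
  | case2 j h => rw [scanJ_unfold, if_neg h]; exact h

theorem scanJ_empty (res : List (List String)) (col nrows : Nat) :
    ∀ j m, j ≤ m → m < scanJ res col nrows j → cellGet res m col = "" := by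
  intro j
  induction j using (scanJ.induct res col nrows) with
  | case1 j h ih =>
    intro m hm hlt
    rcases eq_or_lt_of_le hm with rfl | hlt'
    · exact h.2
    · exact ih m hlt' (by rwa [scanJ_unfold, if_pos h] at hlt)
  | case2 j h =>
    intro m hm hlt
    rw [scanJ_unfold, if_neg h] at hlt; omega

theorem scanJ_eq (res : List (List String)) (col nrows j : Nat) :
    ∀ k, k ≤ j → j ≤ nrows → (∀ m, k ≤ m → m < j → cellGet res m col = "") →
    ¬ (j < nrows ∧ cellGet res j col = "") → scanJ res col nrows k = j := by
  intro k hk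
  induction hd : j - k generalizing k with
  | zero =>
    intro _ _ hstop
    have : k = j := by omega
    subst this
    rw [scanJ_unfold, if_neg hstop]
  | succ d ih =>
    intro hjn hemp hstop
    have hklt : k < j := by omega
    rw [scanJ_unfold, if_pos ⟨by omega, hemp k le_rfl hklt⟩]
    exact ih (k + 1) (by omega) (by omega) hjn (fun m h1 h2 => hemp m (by omega) h2) hstop

theorem specCell_congr (res res' : List (List String)) (col bound : Nat) (carry : String)
    (k : Nat) (hagree : ∀ m, k ≤ m → m < bound → cellGet res' m col = cellGet res m col) :
    specCell res' col bound carry k = specCell res col bound carry k := by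
  unfold specCell
  rw [scanJ_congr res res' col bound k hagree]
  split
  · next h => exact hagree _ (scanJ_ge res col bound k) h
  · rfl

-- lifting the bound from r to r+1 (B's induction step)
theorem specCell_bound_succ (res : List (List String)) (col r : Nat) (carry : String) (k : Nat)
    (hk : k ≤ r) :
    specCell res col (r + 1) carry k =
      if cellGet res r col = "" then specCell res col r carry k
      else specCell res col r (cellGet res r col) k := by
  unfold specCell
  have hs := scanJ_stop res col r k
  have hle := scanJ_le res col r k hk
  have hemp := scanJ_empty res col r k
  set s := scanJ res col r k with hsdef
  have hks : k ≤ s := scanJ_ge res col r k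
  by_cases hsr : s < r
  · -- stops strictly below r: same stop for bound r+1, independent of cell r
    have hne : cellGet res s col ≠ "" := fun hc => hs ⟨hsr, hc⟩
    have h1 : scanJ res col (r + 1) k = s :=
      scanJ_eq res col (r + 1) s k hks (by omega) (fun m hm1 hm2 => hemp m hm1 hm2)
        (by rintro ⟨_, hc⟩; exact hne hc)
    rw [h1, if_pos (show s < r + 1 by omega), if_pos hsr, if_pos hsr]
    split <;> rfl
  · have hsr' : s = r := by omega
    by_cases hr : cellGet res r col = ""
    · -- column empty through row r: the bound-(r+1) scan runs past r as well
      have h1 : scanJ res col (r + 1) k = r + 1 :=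
        scanJ_eq res col (r + 1) (r + 1) k (by omega) le_rfl
          (fun m hm1 hm2 => by
            rcases Nat.lt_or_ge m r with hm | hm
            · exact hemp m hm1 (by omega)
            · have : m = r := by omega
              subst this; exact hr)
          (by rintro ⟨hlt, _⟩; omega)
      rw [h1, if_pos hr, if_neg (by omega), if_neg (by omega)]
    · -- cell r non-empty: the bound-(r+1) scan stops at r, value = cell r = new carry
      have h1 : scanJ res col (r + 1) k = r :=
        scanJ_eq res col (r + 1) r k (by omega) (by omega)
          (fun m hm1 hm2 => hemp m hm1 (by omega))
          (by rintro ⟨_, hc⟩; exact hr hc)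
      rw [h1, if_neg hr, if_pos (by omega), if_neg (by omega)]

theorem passB_spec (col : Nat) : ∀ (r : Nat) (res : List (List String)) (carry : String)
    (k : Nat), (passB res col r carry)[k]? =
      if r ≤ k then res[k]?
      else (res[k]?).map (fun row => row.set col (specCell res col r carry k)) := by
  intro r
  induction r with
  | zero => intro res carry k; simp [passB]
  | succ r ih =>
    intro res carry k
    unfold passB
    by_cases hcell : cellGet res r col = ""
    · rw [if_neg (by simpa using hcell)]
      rw [ih]
      by_cases hk : r + 1 ≤ k
      · rw [if_pos (by omega), if_pos hk, cellSet_getElem?, if_neg (by omega)]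
      · rw [if_neg hk]
        by_cases hkr : r ≤ k
        · have : k = r := by omega
          subst this
          rw [if_pos le_rfl, cellSet_getElem?, if_pos rfl]
          have hsj : scanJ res col (k + 1) k = k + 1 := by
            rw [scanJ_unfold, if_pos ⟨by omega, hcell⟩, scanJ_unfold, if_neg (by omega)]
          have hv : specCell res col (k + 1) carry k = carry := by
            unfold specCell
            rw [hsj, if_neg (by omega)]
          rw [hv]
        · rw [if_neg hkr, cellSet_getElem?, if_neg (by omega)]
          have hag : ∀ m, k ≤ m → m < r →
              cellGet (cellSet res r col carry) m col = cellGet res m col :=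
            fun m _ h2 => cellGet_of_ne res r col carry m col (by omega)
          rw [specCell_congr res (cellSet res r col carry) col r carry k hag,
            specCell_bound_succ res col r carry k (by omega), if_pos hcell]
    · rw [if_pos (by simpa using hcell)]
      rw [ih]
      by_cases hk : r + 1 ≤ k
      · rw [if_pos (by omega), if_pos hk]
      · by_cases hkr : r ≤ k
        · have : k = r := by omega
          subst this
          rw [if_pos le_rfl, if_neg (by omega)]
          have hsj : scanJ res col (k + 1) k = k := by
            rw [scanJ_unfold, if_neg (by rintro ⟨_, hc⟩; exact hcell hc)]
          have hv : specCell res col (k + 1) carry k = cellGet res k col := by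
            unfold specCell
            rw [hsj, if_pos (by omega)]
          rw [hv]
          exact (map_set_cellGet res k col).symm
        · rw [if_neg hkr, if_neg (by omega),
            specCell_bound_succ res col r carry k (by omega), if_neg hcell]

theorem fillRange_unfold (res : List (List String)) (col : Nat) (v : String) (i j : Nat) :
    fillRange res col v i j =
      if i < j then fillRange (cellSet res i col v) col v (i + 1) j else res := by
  rw [fillRange]

theorem fillRange_getElem? (col : Nat) (v : String) :
    ∀ (d i j : Nat) (res : List (List String)) (k : Nat), j - i ≤ d →
      (fillRange res col v i j)[k]? =
        if i ≤ k ∧ k < j then (res[k]?).map (fun row => row.set col v) else res[k]? := by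
  intro d
  induction d with
  | zero =>
    intro i j res k hd
    rw [fillRange_unfold, if_neg (by omega), if_neg (by omega)]
  | succ d ih =>
    intro i j res k hd
    by_cases hij : i < j
    · rw [fillRange_unfold, if_pos hij, ih (i + 1) j _ k (by omega)]
      by_cases h1 : i + 1 ≤ k ∧ k < j
      · rw [if_pos h1, if_pos (by omega), cellSet_getElem?, if_neg (by omega)]
      · rw [if_neg h1, cellSet_getElem?]
        by_cases h2 : i = k
        · subst h2
          rw [if_pos rfl, if_pos ⟨le_rfl, hij⟩]
        · rw [if_neg h2, if_neg (by omega)]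
    · rw [fillRange_unfold, if_neg hij, if_neg (by omega)]

theorem fillRange_length (col : Nat) (v : String) :
    ∀ (d i j : Nat) (res : List (List String)), j - i ≤ d →
      (fillRange res col v i j).length = res.length := by
  intro d
  induction d with
  | zero => intro i j res hd; rw [fillRange_unfold, if_neg (by omega)]
  | succ d ih =>
    intro i j res hd
    by_cases hij : i < j
    · rw [fillRange_unfold, if_pos hij, ih (i + 1) j _ (by omega), cellSet_length]
    · rw [fillRange_unfold, if_neg hij]

theorem cellGet_fillRange_of_ge (res : List (List String)) (col : Nat) (v : String)
    (i j m c : Nat) (hm : j ≤ m) :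
    cellGet (fillRange res col v i j) m c = cellGet res m c := by
  unfold cellGet
  rw [fillRange_getElem? col v (j - i) i j res m le_rfl, if_neg (by omega)]

theorem loopA_unfold (res : List (List String)) (col nrows i : Nat) :
    loopA res col nrows i =
      if i < nrows then
        if cellGet res i col = "" then
          loopA
            (if scanJ res col nrows (i + 1) < nrows then
              fillRange res col (cellGet res (scanJ res col nrows (i + 1)) col) i
                (scanJ res col nrows (i + 1))
            else res) col nrows (scanJ res col nrows (i + 1) + 1)
        else loopA res col nrows (i + 1)
      else res := by
  rw [loopA]
  rw [dite_eq_ite]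

theorem loopA_spec (col nrows : Nat) : ∀ (d i : Nat) (res : List (List String)),
    nrows - i ≤ d → res.length = nrows → ∀ k, (loopA res col nrows i)[k]? =
      if k < i then res[k]?
      else (res[k]?).map (fun row => row.set col (specCell res col nrows "" k)) := by
  intro d
  induction d with
  | zero =>
    intro i res hd hlen k
    rw [loopA_unfold, if_neg (by omega)]
    by_cases hk : k < i
    · rw [if_pos hk]
    · rw [if_neg hk]
      have : res[k]? = none := List.getElem?_eq_none (by omega)
      simp [this]
  | succ d ih =>
    intro i res hd hlen k
    by_cases hi : i < nrows
    · by_cases hcell : cellGet res i col = ""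
      · rw [loopA_unfold, if_pos hi, if_pos hcell]
        have hjge : i + 1 ≤ scanJ res col nrows (i + 1) := scanJ_ge res col nrows (i + 1)
        have hjle : scanJ res col nrows (i + 1) ≤ nrows := scanJ_le res col nrows (i + 1) (by omega)
        have hjstop := scanJ_stop res col nrows (i + 1)
        have hjemp := scanJ_empty res col nrows (i + 1)
        set j := scanJ res col nrows (i + 1) with hjdef
        clear_value j
        -- every cell of the column in [i, j) is empty
        have hempij : ∀ m, i ≤ m → m < j → cellGet res m col = "" := by
          intro m h1 h2
          rcases eq_or_lt_of_le h1 with rfl | h1'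
          · exact hcell
          · exact hjemp m h1' h2
        by_cases hjn : j < nrows
        · have hvne : cellGet res j col ≠ "" := fun hc => hjstop ⟨hjn, hc⟩
          rw [if_pos hjn]
          set v := cellGet res j col with hvdef
          clear_value v
          have hlen' : (fillRange res col v i j).length = nrows := by
            rw [fillRange_length col v (j - i) i j res le_rfl]; exact hlen
          rw [ih (j + 1) _ (by omega) hlen' k]
          have hget := fillRange_getElem? col v (j - i) i j res k le_rfl
          by_cases hk1 : k < i
          · rw [if_pos (by omega), if_pos hk1, hget, if_neg (by omega)]
          · by_cases hk2 : k < j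
            · -- filled cell: value v; spec of res gives v as well
              rw [if_pos (by omega), if_neg hk1, hget, if_pos ⟨by omega, hk2⟩]
              have hspec : specCell res col nrows "" k = v := by
                unfold specCell
                have : scanJ res col nrows k = j :=
                  scanJ_eq res col nrows j k (by omega) hjle
                    (fun m h1 h2 => hempij m (by omega) h2)
                    (by rintro ⟨_, hc⟩; exact hvne (by rw [hvdef]; exact hc))
                rw [this, if_pos hjn]
                exact hvdef.symm
              rw [hspec]
            · by_cases hk3 : k = j
              · -- row j itself: non-empty, kept; spec keeps it too
                rw [if_pos (by omega), if_neg hk1, hget, if_neg (by omega)]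
                have hspec : specCell res col nrows "" k = cellGet res k col := by
                  unfold specCell
                  have hsj : scanJ res col nrows k = k :=
                    scanJ_eq res col nrows k k le_rfl (by omega) (by omega)
                      (by rintro ⟨_, hc⟩; exact hvne (by rw [hvdef, ← hk3]; exact hc))
                  rw [hsj, if_pos (by omega)]
                rw [hspec]
                exact (map_set_cellGet res k col).symm
              · -- rows past j: spec unchanged by the fill (which touches only rows < j)
                rw [if_neg (by omega), hget, if_neg (by omega)]
                have hag : ∀ m, k ≤ m → m < nrows →
                    cellGet (fillRange res col v i j) m col = cellGet res m col :=
                  fun m h1 _ => cellGet_fillRange_of_ge res col v i j m col (by omega)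
                rw [specCell_congr res (fillRange res col v i j) col nrows "" k hag]
                by_cases hk4 : k < nrows
                · rw [if_neg (by omega)]
                · rw [if_neg (by omega)]
        · -- no non-empty cell below i: everything from i on is empty and stays ""
          have hjn' : j = nrows := by omega
          rw [if_neg hjn]
          rw [ih (j + 1) _ (by omega) hlen k]
          by_cases hk1 : k < i
          · rw [if_pos (by omega), if_pos hk1]
          · rw [if_neg hk1]
            by_cases hk2 : k < nrows
            · rw [if_pos (by omega)]
              have hkemp : cellGet res k col = "" := hempij k (by omega) (by omega)
              have hspec : specCell res col nrows "" k = "" := by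
                unfold specCell
                have : scanJ res col nrows k = nrows :=
                  scanJ_eq res col nrows nrows k (by omega) le_rfl
                    (fun m h1 h2 => hempij m (by omega) (by omega))
                    (by rintro ⟨hlt, _⟩; omega)
                rw [this, if_neg (by omega)]
              rw [hspec]
              rcases hres : res[k]? with _ | row
              · rfl
              · simp only [Option.map_some]
                congr 1
                have : ("" : String) = (row[col]?).getD "" := by
                  have : cellGet res k col = (row[col]?).getD "" := by
                    simp [cellGet, hres]
                  rw [← this, hkemp]
                rw [this, set_cellGet_self]
            · have hnone : res[k]? = none := List.getElem?_eq_none (by omega)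
              simp [hnone]
      · rw [loopA_unfold, if_pos hi, if_neg hcell, ih (i + 1) _ (by omega) hlen k]
        by_cases hk1 : k < i
        · rw [if_pos (by omega), if_pos hk1]
        · by_cases hk2 : k = i
          · subst hk2
            rw [if_pos (by omega), if_neg (by omega)]
            have hsj : scanJ res col nrows k = k := by
              rw [scanJ_unfold, if_neg (by rintro ⟨_, hc⟩; exact hcell hc)]
            have hspec : specCell res col nrows "" k = cellGet res k col := by
              unfold specCell
              rw [hsj, if_pos hi]
            rw [hspec]
            exact (map_set_cellGet res k col).symm
          · rw [if_neg (by omega), if_neg (by omega)]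
    · rw [loopA_unfold, if_neg hi]
      by_cases hk : k < i
      · rw [if_pos hk]
      · rw [if_neg hk]
        have : res[k]? = none := List.getElem?_eq_none (by omega)
        simp [this]

theorem passB_length (col : Nat) :
    ∀ (r : Nat) (res : List (List String)) (carry : String),
      (passB res col r carry).length = res.length := by
  intro r
  induction r with
  | zero => intro res carry; rfl
  | succ r ih =>
    intro res carry
    simp only [passB]
    split
    · rw [ih]
    · rw [ih, cellSet_length]

-- the heart of the equivalence: A's forward-run pass and B's bottom-up carry pass
-- produce the same column
theorem col_pass_eq (res : List (List String)) (col : Nat) :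
    loopA res col res.length 0 = passB res col res.length "" := by
  apply List.ext_getElem?
  intro k
  rw [loopA_spec col res.length (res.length) 0 res (by omega) rfl k,
    passB_spec col res.length res "" k]
  by_cases hk : res.length ≤ k
  · rw [if_pos hk, if_neg (by omega)]
    have : res[k]? = none := List.getElem?_eq_none hk
    simp [this]
  · rw [if_neg (by omega), if_neg (by omega)]

theorem fold_eq (nrows : Nat) : ∀ (cols : List Nat) (res : List (List String)),
    res.length = nrows →
    cols.foldl (fun res col => loopA res col nrows 0) res =
      cols.foldl (fun res col => passB res col res.length "") res := by
  intro cols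
  induction cols with
  | nil => intro res _; rfl
  | cons c cs ih =>
    intro res hlen
    simp only [List.foldl_cons]
    have h1 : loopA res c nrows 0 = passB res c res.length "" := by
      rw [← hlen]; exact col_pass_eq res c
    rw [h1]
    exact ih _ (by rw [passB_length]; exact hlen)

-- ===== VERDICT (by name: the statement is the Claim_ definition above) =====
theorem fill_rowspan_cells_py_spec : Claim_equal_fill_rowspan_cells_py := by
  intro body _
  unfold Spec_fill_rowspan_cells_py fill_rowspan_cells_py fill_rowspan_cells_py_alt
  by_cases hb : body = []
  · rw [if_pos hb, if_pos hb]
  · rw [if_neg hb, if_neg hb]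
    exact fold_eq _ _ _ rfl
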